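-- pv_equiv track=rewrite | github.com/fineanmol/hacktoberfest | PROJECTS/Password_Generator/password_generator.py | _analyze_patterns
-- ===== SOURCE A (Python) =====
-- def _analyze_patterns(password):
--     """Analyze password patterns"""
--     patterns = {
--         'has_sequences': False,
--         'has_repetition': False,
--         'has_keyboard_patterns': False
--     }
--
--     # Check for sequences
--     sequences = ['123', 'abc', 'qwe', 'asd', 'zxc']
--     for seq in sequences:
--         if seq in password.lower():
--             patterns['has_sequences'] = True
--             break
--
--     # Check for repetition
--     for i in range(len(password) - 2):
--         if password[i] == password[i+1] == password[i+2]: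
--             patterns['has_repetition'] = True
--             break
--
--     # Check for keyboard patterns
--     keyboard_rows = ['qwertyuiop', 'asdfghjkl', 'zxcvbnm']
--     for row in keyboard_rows:
--         for i in range(len(row) - 2):
--             pattern = row[i:i+3]
--             if pattern in password.lower():
--                 patterns['has_keyboard_patterns'] = True
--                 break
--
--     return patterns
-- ===== SOURCE B (Python) =====
-- def _analyze_patterns(password):
--     """Analyze password patterns"""
--     lower = password.lower()
--
--     # fixed sequences: any() over the same list
--     has_sequences = any(seq in lower for seq in ['123', 'abc', 'qwe', 'asd', 'zxc'])
--
--     # repetition: single run-length scan over adjacent pairs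
--     has_repetition = False
--     run = 1
--     for prev, cur in zip(password, password[1:]):
--         run = run + 1 if cur == prev else 1
--         if run >= 3:
--             has_repetition = True
--             break
--
--     # keyboard patterns: slide a 3-char window over the lowered password
--     # and ask whether it occurs inside any keyboard row
--     keyboard_rows = ['qwertyuiop', 'asdfghjkl', 'zxcvbnm']
--     has_keyboard_patterns = any(
--         any(lower[i:i + 3] in row for row in keyboard_rows)
--         for i in range(len(lower) - 2)
--     )
--
--     return {
--         'has_sequences': has_sequences,
--         'has_repetition': has_repetition,
--         'has_keyboard_patterns': has_keyboard_patterns,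
--     }
-- ===== Notes on version B (the rewrite author's own statement) =====
-- stated objective: alternative
-- what changed: Repetition is found by a single run-length scan over zip(password, password[1:]) instead of the index-triple loop, and the keyboard check is inverted to slide each 3-char window of the lowered password over the rows instead of enumerating each row's 3-grams and searching the password; the sequence check becomes a single any().
import Mathlib
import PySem

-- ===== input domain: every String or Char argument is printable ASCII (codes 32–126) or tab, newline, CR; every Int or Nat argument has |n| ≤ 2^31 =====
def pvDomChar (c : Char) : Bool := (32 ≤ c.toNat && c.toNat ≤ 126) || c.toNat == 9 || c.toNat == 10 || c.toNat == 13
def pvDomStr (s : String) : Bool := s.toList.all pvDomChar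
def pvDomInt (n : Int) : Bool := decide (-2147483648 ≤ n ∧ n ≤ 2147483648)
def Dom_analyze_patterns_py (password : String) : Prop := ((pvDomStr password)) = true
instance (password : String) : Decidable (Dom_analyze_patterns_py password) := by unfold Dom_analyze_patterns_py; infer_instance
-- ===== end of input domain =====

-- B replaces A's three scans by an any() over the sequence list, a single run-length
-- scan over adjacent pairs for repetition, and an inverted keyboard check that slides a
-- 3-char window over the password and looks it up in the rows (objective: alternative).

-- ===== PORT A =====
-- for seq in sequences: if seq in password.lower(): flag; break
def pyA_seqLoop (L : List Char) (d : PySem.Dict String Bool) : List (List Char) → PySem.Dict String Bool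
  | [] => d
  | seq :: rest =>
    if PySem.Chars.isIn seq L then d.insert "has_sequences" true
    else pyA_seqLoop L d rest

-- for i in range(len(password)-2): if password[i]==password[i+1]==password[i+2]: flag; break
def pyA_repLoop (P : List Char) (d : PySem.Dict String Bool) : List Int → PySem.Dict String Bool
  | [] => d
  | i :: rest =>
    if PySem.List.pyGetD P i ' ' = PySem.List.pyGetD P (i+1) ' ' ∧
       PySem.List.pyGetD P (i+1) ' ' = PySem.List.pyGetD P (i+2) ' ' then
      d.insert "has_repetition" true
    else pyA_repLoop P d rest

-- for i in range(len(row)-2): pattern = row[i:i+3]; if pattern in password.lower(): flag; break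
def pyA_kbdInner (L row : List Char) (d : PySem.Dict String Bool) : List Int → PySem.Dict String Bool
  | [] => d
  | i :: rest =>
    let pattern := PySem.List.slice row (some i) (some (i+3))
    if PySem.Chars.isIn pattern L then d.insert "has_keyboard_patterns" true
    else pyA_kbdInner L row d rest

-- for row in keyboard_rows: <inner loop>
def pyA_kbdLoop (L : List Char) (d : PySem.Dict String Bool) : List (List Char) → PySem.Dict String Bool
  | [] => d
  | row :: rest =>
    pyA_kbdLoop L (pyA_kbdInner L row d (PySem.List.pyRange 0 ((row.length : Int) - 2) 1)) rest

def analyze_patterns_py (password : String) : List (String × Bool) :=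
  let patterns : PySem.Dict String Bool :=
    ((PySem.Dict.empty.insert "has_sequences" false).insert "has_repetition" false).insert
      "has_keyboard_patterns" false
  let P := password.toList
  let d1 := pyA_seqLoop (PySem.Chars.lower P) patterns
    [['1','2','3'], ['a','b','c'], ['q','w','e'], ['a','s','d'], ['z','x','c']]
  let d2 := pyA_repLoop P d1 (PySem.List.pyRange 0 ((P.length : Int) - 2) 1)
  let d3 := pyA_kbdLoop (PySem.Chars.lower P) d2
    [['q','w','e','r','t','y','u','i','o','p'], ['a','s','d','f','g','h','j','k','l'],
     ['z','x','c','v','b','n','m']]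
  d3.items

-- ===== PORT B =====
-- run-length scan over zip(password, password[1:])
def pyB_repLoop : List (Char × Char) → Nat → Bool
  | [], _ => false
  | (prev, cur) :: rest, run =>
    let run' := if cur = prev then run + 1 else 1
    if 3 ≤ run' then true else pyB_repLoop rest run'

-- any(any(a+b+c in row for row in keyboard_rows) for a,b,c in zip(lower, lower[1:], lower[2:]))
def pyB_kbdLoop (rows : List (List Char)) : List (Char × Char × Char) → Bool
  | [] => false
  | (a, b, c) :: rest =>
    if rows.any (fun row => PySem.Chars.isIn [a, b, c] row) then true
    else pyB_kbdLoop rows rest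

def analyze_patterns_py_alt (password : String) : List (String × Bool) :=
  let P := password.toList
  let L := PySem.Chars.lower P
  let has_sequences :=
    [['1','2','3'], ['a','b','c'], ['q','w','e'], ['a','s','d'], ['z','x','c']].any
      (fun seq => PySem.Chars.isIn seq L)
  let has_repetition := pyB_repLoop (P.zip (P.drop 1)) 1
  let has_keyboard_patterns :=
    pyB_kbdLoop [['q','w','e','r','t','y','u','i','o','p'], ['a','s','d','f','g','h','j','k','l'],
        ['z','x','c','v','b','n','m']]
      (L.zip ((L.drop 1).zip (L.drop 2)))
  (((PySem.Dict.empty.insert "has_sequences" has_sequences).insert "has_repetition"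
      has_repetition).insert "has_keyboard_patterns" has_keyboard_patterns).items

-- ===== PRECONDITION & SPEC =====
def Spec_analyze_patterns_py (password : String) (out : List (String × Bool)) : Prop := out = analyze_patterns_py_alt password
instance (password : String) (out : List (String × Bool)) : Decidable (Spec_analyze_patterns_py password out) := by unfold Spec_analyze_patterns_py; infer_instance

-- ===== CLAIM (what is proved, stated in full; the proofs are below) =====
def Claim_equal_analyze_patterns_py : Prop := ∀ (password : String), Dom_analyze_patterns_py password → Spec_analyze_patterns_py password (analyze_patterns_py password)

-- ===== LEMMAS AND PROOFS =====

-- a list has three equal consecutive elements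
def hasTriple : List Char → Bool
  | a :: b :: c :: t => (decide (a = b) && decide (b = c)) || hasTriple (b :: c :: t)
  | _ => false

theorem hasTriple_iff (P : List Char) :
    hasTriple P = true ↔ ∃ k : Nat, ∃ _ : k + 2 < P.length,
      P[k] = P[k+1] ∧ P[k+1] = P[k+2] := by
  fun_induction hasTriple P with
  | case1 a b c t ih =>
    simp only [Bool.or_eq_true, Bool.and_eq_true, decide_eq_true_eq, ih]
    constructor
    · rintro (⟨rfl, rfl⟩ | ⟨k, hk, h1, h2⟩)
      · exact ⟨0, by simp, by simp⟩
      · exact ⟨k + 1, by simpa using hk, by simpa using ⟨h1, h2⟩⟩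
    · rintro ⟨k, hk, h1, h2⟩
      match k with
      | 0 => exact Or.inl ⟨by simpa using h1, by simpa using h2⟩
      | k + 1 => exact Or.inr ⟨k, by simpa using hk, by simpa using h1, by simpa using h2⟩
  | case2 l h =>
    constructor
    · intro hh; exact absurd hh (by cases l with
        | nil => simp
        | cons x t => cases t with
          | nil => simp
          | cons y u => cases u with
            | nil => simp
            | cons z v => exact absurd rfl (h x y z v))
    · rintro ⟨k, hk, -⟩
      exfalso
      match l, h with
      | [], _ => simp at hk
      | [x], _ => simp at hk
      | [x, y], _ => simp at hk
      | x :: y :: z :: v, h => exact h x y z v rfl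

-- A's index loop finds a triple iff hasTriple does
theorem repA_eq_hasTriple (P : List Char) :
    (PySem.List.pyRange 0 ((P.length : Int) - 2) 1).any
      (fun i => decide (PySem.List.pyGetD P i ' ' = PySem.List.pyGetD P (i+1) ' ' ∧
                        PySem.List.pyGetD P (i+1) ' ' = PySem.List.pyGetD P (i+2) ' ')) =
      hasTriple P := by
  rw [Bool.eq_iff_iff, List.any_eq_true, hasTriple_iff]
  constructor
  · rintro ⟨i, hi, hc⟩
    rw [PySem.List.mem_pyRange_one] at hi
    obtain ⟨h0, h2⟩ := hi
    simp only [decide_eq_true_eq] at hc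
    refine ⟨i.toNat, by omega, ?_⟩
    rw [PySem.List.pyGetD_eq_getElem P (i := i) ' ' (by omega) (by omega),
        PySem.List.pyGetD_eq_getElem P (i := i+1) ' ' (by omega) (by omega),
        PySem.List.pyGetD_eq_getElem P (i := i+2) ' ' (by omega) (by omega)] at hc
    simp only [show (i+1).toNat = i.toNat + 1 by omega, show (i+2).toNat = i.toNat + 2 by omega] at hc
    exact hc
  · rintro ⟨k, hk, h1, h2⟩
    refine ⟨(k : Int), by rw [PySem.List.mem_pyRange_one]; omega, ?_⟩
    rw [decide_eq_true_eq,
        PySem.List.pyGetD_eq_getElem P (i := (k:Int)) ' ' (by omega) (by omega),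
        PySem.List.pyGetD_eq_getElem P (i := (k:Int)+1) ' ' (by omega) (by omega),
        PySem.List.pyGetD_eq_getElem P (i := (k:Int)+2) ' ' (by omega) (by omega)]
    simp only [show ((k:Int)).toNat = k by omega, show ((k:Int)+1).toNat = k + 1 by omega,
      show ((k:Int)+2).toNat = k + 2 by omega]
    exact ⟨h1, h2⟩

-- B's run-length scan fires iff hasTriple does; the extra disjunct carries the loop state
theorem repB_aux (t : List Char) : ∀ (a : Char) (run : Nat), 1 ≤ run →
    pyB_repLoop ((a :: t).zip t) run =
      (hasTriple (a :: t) ||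
        (decide (2 ≤ run) && (match t with | b :: _ => decide (b = a) | [] => false))) := by
  induction t with
  | nil => intro a run _; simp [pyB_repLoop, hasTriple]
  | cons b u ih =>
    intro a run hrun
    show pyB_repLoop ((a, b) :: (b :: u).zip u) run = _
    by_cases hab : b = a
    · subst hab
      simp only [pyB_repLoop, if_true]
      by_cases h2 : 2 ≤ run
      · rw [if_pos (by omega)]
        simp [h2]
      · rw [if_neg (by omega), ih b (run + 1) (by omega)]
        have : run = 1 := by omega
        subst this
        cases u with
        | nil => simp [hasTriple]
        | cons c v =>
          simp only [hasTriple]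
          by_cases hbc : b = c
          · simp_all
          · have hbc' : ¬ c = b := fun h => hbc h.symm
            simp_all
    · simp only [pyB_repLoop, if_neg hab]
      rw [if_neg (by omega), ih b 1 le_rfl]
      have hab' : ¬ a = b := fun h => hab h.symm
      cases u with
      | nil => simp [hasTriple, hab]
      | cons c v => simp [hasTriple, hab, hab']

theorem repB_eq_hasTriple (P : List Char) : pyB_repLoop (P.zip (P.drop 1)) 1 = hasTriple P := by
  cases P with
  | nil => simp [pyB_repLoop, hasTriple]
  | cons a t => rw [List.drop_one, List.tail_cons, repB_aux t a 1 le_rfl]; simp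

-- loop-with-break shapes for A's three dict-threading loops
theorem pyA_seqLoop_eq (L : List Char) (d : PySem.Dict String Bool) (l : List (List Char)) :
    pyA_seqLoop L d l =
      if l.any (fun seq => PySem.Chars.isIn seq L) then d.insert "has_sequences" true else d := by
  induction l with
  | nil => simp [pyA_seqLoop]
  | cons s rest ih => by_cases h : PySem.Chars.isIn s L <;> simp [pyA_seqLoop, h, ih]

theorem pyA_repLoop_eq (P : List Char) (d : PySem.Dict String Bool) (l : List Int) :
    pyA_repLoop P d l =
      if l.any (fun i => decide (PySem.List.pyGetD P i ' ' = PySem.List.pyGetD P (i+1) ' ' ∧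
            PySem.List.pyGetD P (i+1) ' ' = PySem.List.pyGetD P (i+2) ' ')) then
        d.insert "has_repetition" true
      else d := by
  induction l with
  | nil => simp [pyA_repLoop]
  | cons i rest ih =>
    by_cases h : PySem.List.pyGetD P i ' ' = PySem.List.pyGetD P (i+1) ' ' ∧
        PySem.List.pyGetD P (i+1) ' ' = PySem.List.pyGetD P (i+2) ' ' <;>
      simp [pyA_repLoop, h, ih]

theorem pyA_kbdInner_eq (L row : List Char) (d : PySem.Dict String Bool) (l : List Int) :
    pyA_kbdInner L row d l =
      if l.any (fun i => PySem.Chars.isIn (PySem.List.slice row (some i) (some (i+3))) L) then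
        d.insert "has_keyboard_patterns" true
      else d := by
  induction l with
  | nil => simp [pyA_kbdInner]
  | cons i rest ih =>
    by_cases h : PySem.Chars.isIn (PySem.List.slice row (some i) (some (i+3))) L <;>
      simp [pyA_kbdInner, h, ih]

-- B's window loop hits iff some 3-window of L occurs in a row
theorem pyB_kbdLoop_iff (rows : List (List Char)) (L : List Char) :
    pyB_kbdLoop rows (L.zip ((L.drop 1).zip (L.drop 2))) = true ↔
      ∃ a b c, [a,b,c] <:+: L ∧ (rows.any (fun row => PySem.Chars.isIn [a,b,c] row)) = true := by
  induction L with
  | nil => simp [pyB_kbdLoop]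
  | cons a t ih =>
    cases t with
    | nil =>
      simp only [List.drop_succ_cons, List.drop_nil, List.zip_nil_right, pyB_kbdLoop]
      constructor
      · intro h; simp at h
      · rintro ⟨x, y, z, hinf, -⟩
        exact absurd (List.IsInfix.length_le hinf) (by simp)
    | cons b u =>
      cases u with
      | nil =>
        simp only [List.drop_succ_cons, List.drop_nil, List.zip_nil_right, pyB_kbdLoop]
        constructor
        · intro h; simp at h
        · rintro ⟨x, y, z, hinf, -⟩
          exact absurd (List.IsInfix.length_le hinf) (by simp)
      | cons c v =>
        have hz : (a :: b :: c :: v).zip (((a :: b :: c :: v).drop 1).zip ((a :: b :: c :: v).drop 2)) =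
            (a, (b, c)) :: (b :: c :: v).zip (((b :: c :: v).drop 1).zip ((b :: c :: v).drop 2)) := by
          simp [List.zip_cons_cons]
        rw [hz]
        show (if rows.any (fun row => PySem.Chars.isIn [a, b, c] row) then true
              else pyB_kbdLoop rows _) = true ↔ _
        by_cases hcond : rows.any (fun row => PySem.Chars.isIn [a, b, c] row) = true
        · rw [if_pos hcond]
          simp only [true_iff]
          exact ⟨a, b, c, ⟨[], v, by simp⟩, hcond⟩
        · rw [if_neg hcond, ih]
          constructor
          · rintro ⟨x, y, z, hinf, hc⟩
            exact ⟨x, y, z, List.infix_cons hinf, hc⟩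
          · rintro ⟨x, y, z, hinf, hc⟩
            rcases List.infix_cons_iff.mp hinf with hpre | htail
            · obtain ⟨rfl, h2⟩ := List.cons_prefix_cons.mp hpre
              obtain ⟨rfl, h3⟩ := List.cons_prefix_cons.mp h2
              obtain ⟨rfl, -⟩ := List.cons_prefix_cons.mp h3
              exact absurd hc hcond
            · exact ⟨x, y, z, htail, hc⟩

-- the 20 three-grams of the three keyboard rows
def kbdGrams : List (List Char) :=
  [['q','w','e'],['w','e','r'],['e','r','t'],['r','t','y'],['t','y','u'],['y','u','i'],['u','i','o'],['i','o','p'],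
   ['a','s','d'],['s','d','f'],['d','f','g'],['f','g','h'],['g','h','j'],['h','j','k'],['j','k','l'],
   ['z','x','c'],['x','c','v'],['c','v','b'],['v','b','n'],['b','n','m']]

-- A's per-row 3-gram scans, flattened over the literal rows
theorem kbdA_row1 (L : List Char) :
    ((PySem.List.pyRange 0 ((['q','w','e','r','t','y','u','i','o','p'].length : Int) - 2) 1).any
      (fun i => PySem.Chars.isIn (PySem.List.slice ['q','w','e','r','t','y','u','i','o','p'] (some i) (some (i+3))) L)) =
    ([['q','w','e'],['w','e','r'],['e','r','t'],['r','t','y'],['t','y','u'],['y','u','i'],['u','i','o'],['i','o','p']].any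
      (fun g => PySem.Chars.isIn g L)) := by
  rw [PySem.List.pyRange_one]; rfl

theorem kbdA_row2 (L : List Char) :
    ((PySem.List.pyRange 0 ((['a','s','d','f','g','h','j','k','l'].length : Int) - 2) 1).any
      (fun i => PySem.Chars.isIn (PySem.List.slice ['a','s','d','f','g','h','j','k','l'] (some i) (some (i+3))) L)) =
    ([['a','s','d'],['s','d','f'],['d','f','g'],['f','g','h'],['g','h','j'],['h','j','k'],['j','k','l']].any
      (fun g => PySem.Chars.isIn g L)) := by
  rw [PySem.List.pyRange_one]; rfl

theorem kbdA_row3 (L : List Char) :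
    ((PySem.List.pyRange 0 ((['z','x','c','v','b','n','m'].length : Int) - 2) 1).any
      (fun i => PySem.Chars.isIn (PySem.List.slice ['z','x','c','v','b','n','m'] (some i) (some (i+3))) L)) =
    ([['z','x','c'],['x','c','v'],['c','v','b'],['v','b','n'],['b','n','m']].any
      (fun g => PySem.Chars.isIn g L)) := by
  rw [PySem.List.pyRange_one]; rfl

-- length-3 infixes of the literal rows, characterised
theorem infix3_row1 (a b c : Char) : [a,b,c] <:+: ['q','w','e','r','t','y','u','i','o','p'] ↔
    (a='q'∧b='w'∧c='e') ∨ (a='w'∧b='e'∧c='r') ∨ (a='e'∧b='r'∧c='t') ∨ (a='r'∧b='t'∧c='y') ∨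
    (a='t'∧b='y'∧c='u') ∨ (a='y'∧b='u'∧c='i') ∨ (a='u'∧b='i'∧c='o') ∨ (a='i'∧b='o'∧c='p') := by
  simp [List.infix_cons_iff, List.cons_prefix_cons]

theorem infix3_row2 (a b c : Char) : [a,b,c] <:+: ['a','s','d','f','g','h','j','k','l'] ↔
    (a='a'∧b='s'∧c='d') ∨ (a='s'∧b='d'∧c='f') ∨ (a='d'∧b='f'∧c='g') ∨ (a='f'∧b='g'∧c='h') ∨
    (a='g'∧b='h'∧c='j') ∨ (a='h'∧b='j'∧c='k') ∨ (a='j'∧b='k'∧c='l') := by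
  simp [List.infix_cons_iff, List.cons_prefix_cons]

theorem infix3_row3 (a b c : Char) : [a,b,c] <:+: ['z','x','c','v','b','n','m'] ↔
    (a='z'∧b='x'∧c='c') ∨ (a='x'∧b='c'∧c='v') ∨ (a='c'∧b='v'∧c='b') ∨ (a='v'∧b='b'∧c='n') ∨
    (a='b'∧b='n'∧c='m') := by
  simp [List.infix_cons_iff, List.cons_prefix_cons]

-- the two keyboard flags agree
theorem kbd_eq (L : List Char) :
    kbdGrams.any (fun g => PySem.Chars.isIn g L) =
      pyB_kbdLoop [['q','w','e','r','t','y','u','i','o','p'], ['a','s','d','f','g','h','j','k','l'],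
          ['z','x','c','v','b','n','m']]
        (L.zip ((L.drop 1).zip (L.drop 2))) := by
  rw [Bool.eq_iff_iff, List.any_eq_true, pyB_kbdLoop_iff]
  constructor
  · rintro ⟨g, hg, hIn⟩
    rw [PySem.Chars.isIn_iff_infix] at hIn
    simp only [kbdGrams, List.mem_cons, List.not_mem_nil, or_false] at hg
    rcases hg with rfl|rfl|rfl|rfl|rfl|rfl|rfl|rfl|rfl|rfl|rfl|rfl|rfl|rfl|rfl|rfl|rfl|rfl|rfl|rfl <;>
      exact ⟨_, _, _, hIn, by decide⟩
  · rintro ⟨a, b, c, hinf, hrow⟩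
    rw [List.any_eq_true] at hrow
    obtain ⟨row, hmem, hIn⟩ := hrow
    rw [PySem.Chars.isIn_iff_infix] at hIn
    simp only [List.mem_cons, List.not_mem_nil, or_false] at hmem
    rcases hmem with rfl | rfl | rfl
    · rcases (infix3_row1 a b c).mp hIn with
        ⟨rfl,rfl,rfl⟩|⟨rfl,rfl,rfl⟩|⟨rfl,rfl,rfl⟩|⟨rfl,rfl,rfl⟩|⟨rfl,rfl,rfl⟩|⟨rfl,rfl,rfl⟩|⟨rfl,rfl,rfl⟩|⟨rfl,rfl,rfl⟩ <;>
        exact ⟨_, by decide, (PySem.Chars.isIn_iff_infix _ _).mpr hinf⟩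
    · rcases (infix3_row2 a b c).mp hIn with
        ⟨rfl,rfl,rfl⟩|⟨rfl,rfl,rfl⟩|⟨rfl,rfl,rfl⟩|⟨rfl,rfl,rfl⟩|⟨rfl,rfl,rfl⟩|⟨rfl,rfl,rfl⟩|⟨rfl,rfl,rfl⟩ <;>
        exact ⟨_, by decide, (PySem.Chars.isIn_iff_infix _ _).mpr hinf⟩
    · rcases (infix3_row3 a b c).mp hIn with
        ⟨rfl,rfl,rfl⟩|⟨rfl,rfl,rfl⟩|⟨rfl,rfl,rfl⟩|⟨rfl,rfl,rfl⟩|⟨rfl,rfl,rfl⟩ <;>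
        exact ⟨_, by decide, (PySem.Chars.isIn_iff_infix _ _).mpr hinf⟩

-- kbdGrams split along the three rows
theorem kbd_split (L : List Char) :
    kbdGrams.any (fun g => PySem.Chars.isIn g L) =
      (([['q','w','e'],['w','e','r'],['e','r','t'],['r','t','y'],['t','y','u'],['y','u','i'],['u','i','o'],['i','o','p']].any
          (fun g => PySem.Chars.isIn g L)) ||
       ([['a','s','d'],['s','d','f'],['d','f','g'],['f','g','h'],['g','h','j'],['h','j','k'],['j','k','l']].any
          (fun g => PySem.Chars.isIn g L)) ||
       ([['z','x','c'],['x','c','v'],['c','v','b'],['v','b','n'],['b','n','m']].any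
          (fun g => PySem.Chars.isIn g L))) := by
  simp [kbdGrams, List.any_cons, List.any_nil, Bool.or_assoc]

-- ===== VERDICT (by name: the statement is the Claim_ definition above) =====
theorem analyze_patterns_py_spec : Claim_equal_analyze_patterns_py := by
  intro password _
  unfold Spec_analyze_patterns_py analyze_patterns_py analyze_patterns_py_alt
  simp only [pyA_kbdLoop, pyA_seqLoop_eq, pyA_repLoop_eq, pyA_kbdInner_eq,
    kbdA_row1, kbdA_row2, kbdA_row3,
    repA_eq_hasTriple, ← repB_eq_hasTriple]
  rw [show pyB_kbdLoop [['q','w','e','r','t','y','u','i','o','p'], ['a','s','d','f','g','h','j','k','l'],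
        ['z','x','c','v','b','n','m']]
        ((PySem.Chars.lower password.toList).zip
          (((PySem.Chars.lower password.toList).drop 1).zip ((PySem.Chars.lower password.toList).drop 2))) = _
      from (kbd_eq (PySem.Chars.lower password.toList)).symm.trans (kbd_split _)]
  generalize ([['q','w','e'],['w','e','r'],['e','r','t'],['r','t','y'],['t','y','u'],['y','u','i'],['u','i','o'],['i','o','p']].any
      (fun g => PySem.Chars.isIn g (PySem.Chars.lower password.toList))) = g1
  generalize ([['a','s','d'],['s','d','f'],['d','f','g'],['f','g','h'],['g','h','j'],['h','j','k'],['j','k','l']].any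
      (fun g => PySem.Chars.isIn g (PySem.Chars.lower password.toList))) = g2
  generalize ([['z','x','c'],['x','c','v'],['c','v','b'],['v','b','n'],['b','n','m']].any
      (fun g => PySem.Chars.isIn g (PySem.Chars.lower password.toList))) = g3
  generalize ([['1','2','3'], ['a','b','c'], ['q','w','e'], ['a','s','d'], ['z','x','c']].any
      (fun seq => PySem.Chars.isIn seq (PySem.Chars.lower password.toList))) = s
  generalize pyB_repLoop (password.toList.zip (password.toList.drop 1)) 1 = r
  revert g1 g2 g3 s r
  decide
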